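-- pv_equiv track=rewrite | github.com/AlexRHill/CSE231 | Lab09/lab09part2.py | print_index
-- ===== SOURCE A (Python) =====
-- import string
--
-- def print_index(f_obj,main_words):
--     my_dict = {}
--     count = 1
--     set1 = set()
--     set2 = set()
--
--     for line in main_words:
--         line = line.strip()
--         word_list = line.split()
--         for word in word_list:
--             word = word.lower()
--             word = word.strip(string.punctuation)
--             if word != '':
--                 set1.add(word)
--
--     for line in f_obj:
--         line = line.strip()
--         word_list = line.split()
--         for word in word_list:
--             word = word.lower()
--             word = word.strip(string.punctuation)
--             if word:
--                 if word in my_dict: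
--                     b_set = my_dict[word]
--                     b_set.add(count)
--                 else:
--                     if word in set1:
--                         a_set = set()
--                         a_set.add(count)
--                         my_dict[word]=a_set
--
--         count += 1
--
--     return my_dict
-- ===== SOURCE B (Python) =====
-- import string
--
-- def _norm(w):
--     return w.lower().strip(string.punctuation)
--
-- def print_index(f_obj, main_words):
--     targets = {w for line in main_words for w in map(_norm, line.strip().split()) if w != ''}
--     tokens = [(i, w)
--               for i, line in enumerate(f_obj, 1)
--               for w in map(_norm, line.strip().split())
--               if w and w in targets]
--     return {w: {i for i, x in tokens if x == w}
--             for w in dict.fromkeys(x for _, x in tokens)}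
-- ===== Notes on version B (the rewrite author's own statement) =====
-- stated objective: alternative
-- what changed: B replaces A's incremental dict-building second pass (per-word contains/insert/update inside nested loops with a running count) by a flatten-and-group decomposition: it first flattens f_obj into one filtered token list of (line number, normalized word) pairs, then forms the deduped key order with dict.fromkeys and builds each value by a per-word comprehension scanning the token list.
import Mathlib
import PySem

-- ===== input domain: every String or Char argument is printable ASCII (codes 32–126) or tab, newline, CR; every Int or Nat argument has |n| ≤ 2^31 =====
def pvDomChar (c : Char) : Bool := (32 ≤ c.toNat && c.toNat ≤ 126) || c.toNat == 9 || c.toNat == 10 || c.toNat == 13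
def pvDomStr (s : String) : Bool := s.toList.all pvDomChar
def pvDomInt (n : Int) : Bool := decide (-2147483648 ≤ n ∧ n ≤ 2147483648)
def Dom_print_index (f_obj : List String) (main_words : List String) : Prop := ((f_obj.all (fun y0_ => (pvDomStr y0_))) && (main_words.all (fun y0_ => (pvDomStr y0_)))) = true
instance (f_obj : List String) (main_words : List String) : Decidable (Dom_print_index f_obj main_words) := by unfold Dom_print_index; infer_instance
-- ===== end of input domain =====

-- B flattens f_obj into a single filtered token list (line number, word) and builds the result
-- by grouping: deduped keys, each value collected by a per-word scan of the tokens (alternative decomposition).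


-- string.punctuation
def pyPunct : String := "!\"#$%&'()*+,-./:;<=>?@[\\]^_`{|}~"

-- ===== PORT A =====
-- word = word.lower(); word = word.strip(string.punctuation); if word != '': set1.add(word)
def aAddWord (s : PySem.Set String) (word : String) : PySem.Set String :=
  let w := PySem.Str.stripChars (PySem.Str.lower word) pyPunct
  if w ≠ "" then PySem.Set.add s w else s

-- first pass of A: build set1 from main_words
def aSet1 (main_words : List String) : PySem.Set String :=
  main_words.foldl
    (fun s line => (PySem.Str.split₀ (PySem.Str.strip line)).foldl aAddWord s)
    PySem.Set.empty

-- body of A's inner loop over the words of one line of f_obj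
def aWordStep (set1 : PySem.Set String) (count : Int)
    (d : PySem.Dict String (List Int)) (word : String) : PySem.Dict String (List Int) :=
  let w := PySem.Str.stripChars (PySem.Str.lower word) pyPunct
  if w ≠ "" then
    if d.contains w then
      d.modify w PySem.Set.empty (fun s => PySem.Set.add s count)     -- b_set = my_dict[word]; b_set.add(count)
    else if PySem.Set.contains set1 w then
      d.insert w (PySem.Set.add PySem.Set.empty count)                -- a_set = set(); a_set.add(count); my_dict[word] = a_set
    else d
  else d

-- body of A's loop over f_obj: process one line's words, then count += 1
def aLineStep (set1 : PySem.Set String)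
    (st : PySem.Dict String (List Int) × Int) (line : String) :
    PySem.Dict String (List Int) × Int :=
  ((PySem.Str.split₀ (PySem.Str.strip line)).foldl (aWordStep set1 st.2) st.1, st.2 + 1)

def print_index (f_obj : List String) (main_words : List String) : List (String × List Int) :=
  ((f_obj.foldl (aLineStep (aSet1 main_words)) (PySem.Dict.empty, 1)).1).items

-- ===== PORT B =====
-- _norm(word) = word.lower().strip(string.punctuation)
def normWord (word : String) : String := PySem.Str.stripChars (PySem.Str.lower word) pyPunct

-- targets = {w for line in main_words for w in map(_norm, line.strip().split()) if w != ''}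
def bTargets (main_words : List String) : PySem.Set String :=
  PySem.Set.ofList
    (((main_words.flatMap (fun line => PySem.Str.split₀ (PySem.Str.strip line))).map normWord).filter
      (fun w => w ≠ ""))

-- tokens = [(i, w) for i, line in enumerate(f_obj, 1) for w in map(_norm, line.strip().split()) if w and w in targets]
def bTokens (f_obj : List String) (targets : PySem.Set String) : List (Int × String) :=
  (PySem.List.enumerate f_obj 1).flatMap (fun pr =>
    (((PySem.Str.split₀ (PySem.Str.strip pr.2)).map normWord).filter
      (fun w => w ≠ "" && PySem.Set.contains targets w)).map (fun w => (pr.1, w)))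

-- return {w: {i for i, x in tokens if x == w} for w in dict.fromkeys(x for _, x in tokens)}
def print_index_alt (f_obj : List String) (main_words : List String) : List (String × List Int) :=
  let toks := bTokens f_obj (bTargets main_words)
  (PySem.List.dedup (toks.map Prod.snd)).map
    (fun w => (w, PySem.Set.ofList ((toks.filter (fun p => p.2 == w)).map Prod.fst)))

-- ===== PRECONDITION & SPEC =====
def Spec_print_index (f_obj : List String) (main_words : List String) (out : List (String × List Int)) : Prop := out = print_index_alt f_obj main_words
instance (f_obj : List String) (main_words : List String) (out : List (String × List Int)) : Decidable (Spec_print_index f_obj main_words out) := by unfold Spec_print_index; infer_instance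

-- ===== CLAIM (what is proved, stated in full; the proofs are below) =====
def Claim_equal_print_index : Prop := ∀ (f_obj : List String) (main_words : List String), Dom_print_index f_obj main_words → Spec_print_index f_obj main_words (print_index f_obj main_words)

-- ===== LEMMAS AND PROOFS =====

-- the common shape both programs reduce to: a setdefault-add fold over (line number, word) tokens
def upsert (d : PySem.Dict String (List Int)) (p : Int × String) : PySem.Dict String (List Int) :=
  d.modify p.2 PySem.Set.empty (fun s => PySem.Set.add s p.1)

-- the two set1 builds produce the same list
theorem set1_inner_eq (l : List String) (s : PySem.Set String) :
    l.foldl aAddWord s = ((l.map normWord).filter (fun w => w ≠ "")).foldl PySem.Set.add s := by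
  induction l generalizing s with
  | nil => simp
  | cons x xs ih =>
      simp only [List.foldl_cons, List.map_cons, List.filter_cons]
      by_cases h : normWord x = ""
      · have h2 : aAddWord s x = s := by
          simp [aAddWord, normWord] at h ⊢; simp [h]
        simp [h, h2, ih]
      · have h2 : aAddWord s x = PySem.Set.add s (normWord x) := by
          simp [aAddWord, normWord] at h ⊢; simp [h]
        simp [h, h2, ih]

theorem set1_outer_eq (lines : List String) (s : PySem.Set String) :
    lines.foldl (fun s line => (PySem.Str.split₀ (PySem.Str.strip line)).foldl aAddWord s) s
      = (((lines.flatMap (fun line => PySem.Str.split₀ (PySem.Str.strip line))).map normWord).filter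
          (fun w => w ≠ "")).foldl PySem.Set.add s := by
  induction lines generalizing s with
  | nil => simp
  | cons x xs ih =>
      rw [List.foldl_cons, set1_inner_eq, ih, List.flatMap_cons, List.map_append,
        List.filter_append, List.foldl_append]

theorem set1_eq (main_words : List String) : aSet1 main_words = bTargets main_words := by
  rw [bTargets, PySem.Set.ofList_eq_foldl, aSet1]
  exact set1_outer_eq main_words PySem.Set.empty

-- keys of any fold of upserts stay inside set1 when all token words are in set1
theorem upsert_keys_inv (set1 : PySem.Set String) (toks : List (Int × String))
    (htoks : ∀ p ∈ toks, PySem.Set.contains set1 p.2 = true)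
    (d : PySem.Dict String (List Int))
    (hd : ∀ k, d.contains k = true → PySem.Set.contains set1 k = true) :
    ∀ k, (toks.foldl upsert d).contains k = true → PySem.Set.contains set1 k = true := by
  induction toks generalizing d with
  | nil => exact hd
  | cons p ps ih =>
      intro k hk
      refine ih (fun q hq => htoks q (by simp [hq])) (upsert d p) ?_ k hk
      intro k' hk'
      rw [upsert, PySem.Dict.contains_modify, Bool.or_eq_true] at hk'
      rcases hk' with h | h
      · exact (eq_of_beq h) ▸ htoks p (by simp)
      · exact hd k' h

-- one word of A's second pass = one upsert on the (count, word) token, when the word survives the filter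
theorem aWordStep_eq (set1 : PySem.Set String) (c : Int)
    (d : PySem.Dict String (List Int)) (word : String)
    (h : d.contains (normWord word) = true → PySem.Set.contains set1 (normWord word) = true) :
    aWordStep set1 c d word
      = if (normWord word ≠ "" && PySem.Set.contains set1 (normWord word)) then
          upsert d (c, normWord word)
        else d := by
  by_cases hw : normWord word = ""
  · have h0 : PySem.Str.stripChars (PySem.Str.lower word) pyPunct = "" := hw
    simp [aWordStep, normWord, h0]
  · have hne : PySem.Str.stripChars (PySem.Str.lower word) pyPunct ≠ "" := hw
    by_cases hc : d.contains (normWord word) = true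
    · have hs' : normWord word ∈ set1 := (PySem.Set.contains_iff _ _).1 (h hc)
      simp only [normWord] at hc hs' hw
      simp [aWordStep, upsert, normWord, hw, hc, hs']
    · have hc0 : d.contains (normWord word) = false := by simpa using hc
      by_cases hs : PySem.Set.contains set1 (normWord word) = true
      · have hs' : normWord word ∈ set1 := (PySem.Set.contains_iff _ _).1 hs
        have hg : d.getD (normWord word) ([] : List Int) = [] :=
          PySem.Dict.getD_of_not_contains d [] hc0
        simp only [normWord] at hc0 hs' hw hg
        simp [aWordStep, upsert, normWord, hw, hc0, hs', PySem.Dict.modify, hg, PySem.Set.add]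
      · have hs'' : normWord word ∉ set1 := fun hm =>
          absurd ((PySem.Set.contains_iff _ _).2 hm) (by simpa using hs)
        simp only [normWord] at hc0 hs'' hw
        simp [aWordStep, normWord, hw, hc0, hs'']

-- A's inner loop over the words of one line = fold of upsert over that line's filtered tokens
theorem words_eq (set1 : PySem.Set String) (c : Int) (ws : List String)
    (d : PySem.Dict String (List Int))
    (hd : ∀ k, d.contains k = true → PySem.Set.contains set1 k = true) :
    ws.foldl (aWordStep set1 c) d
      = ((((ws.map normWord).filter (fun w => w ≠ "" && PySem.Set.contains set1 w)).map
          (fun w => (c, w))).foldl upsert d) := by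
  induction ws generalizing d with
  | nil => rfl
  | cons x xs ih =>
      rw [List.foldl_cons, aWordStep_eq set1 c d x (hd _)]
      simp only [List.map_cons, List.filter_cons]
      by_cases hx : (decide (normWord x ≠ "") && PySem.Set.contains set1 (normWord x)) = true
      · rw [if_pos hx]
        simp only [hx, if_true, List.map_cons, List.foldl_cons]
        refine ih (upsert d (c, normWord x)) ?_
        intro k hk
        rw [upsert, PySem.Dict.contains_modify, Bool.or_eq_true] at hk
        rcases hk with hh | hh
        · exact (eq_of_beq hh) ▸ (by rw [Bool.and_eq_true] at hx; exact hx.2)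
        · exact hd k hh
      · have hx0 : (decide (normWord x ≠ "") && PySem.Set.contains set1 (normWord x)) = false := by
          simpa using hx
        rw [if_neg hx]
        simp only [hx0, Bool.false_eq_true, if_false]
        exact ih d hd

-- tokens of a list of lines, starting at count c (proof-local abbreviation)
def bTokens' (lines : List String) (c : Int) (set1 : PySem.Set String) : List (Int × String) :=
  (PySem.List.enumerate lines c).flatMap (fun pr =>
    (((PySem.Str.split₀ (PySem.Str.strip pr.2)).map normWord).filter
      (fun w => w ≠ "" && PySem.Set.contains set1 w)).map (fun w => (pr.1, w)))

-- A's outer loop = fold of upsert over all tokens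
theorem lines_eq (set1 : PySem.Set String) (lines : List String) (c : Int)
    (d : PySem.Dict String (List Int))
    (hd : ∀ k, d.contains k = true → PySem.Set.contains set1 k = true) :
    (lines.foldl (aLineStep set1) (d, c)).1
      = (bTokens' lines c set1).foldl upsert d := by
  induction lines generalizing c d with
  | nil => rfl
  | cons x xs ih =>
      have hline := words_eq set1 c (PySem.Str.split₀ (PySem.Str.strip x)) d hd
      have htoks : ∀ p ∈ (((PySem.Str.split₀ (PySem.Str.strip x)).map normWord).filter
          (fun w => w ≠ "" && PySem.Set.contains set1 w)).map (fun w => ((c : Int), w)),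
          PySem.Set.contains set1 p.2 = true := by
        intro p hp
        simp only [List.mem_map, List.mem_filter] at hp
        obtain ⟨w, ⟨_, hw⟩, rfl⟩ := hp
        rw [Bool.and_eq_true] at hw; exact hw.2
      have hd' := upsert_keys_inv set1 _ htoks d hd
      have hstep : aLineStep set1 (d, c) x
          = ((((( (PySem.Str.split₀ (PySem.Str.strip x)).map normWord).filter
              (fun w => w ≠ "" && PySem.Set.contains set1 w)).map
              (fun w => ((c : Int), w))).foldl upsert d), c + 1) := by
        simp [aLineStep, hline]
      have hsplit : bTokens' (x :: xs) c set1
          = ((((PySem.Str.split₀ (PySem.Str.strip x)).map normWord).filter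
              (fun w => w ≠ "" && PySem.Set.contains set1 w)).map (fun w => ((c : Int), w)))
            ++ bTokens' xs (c + 1) set1 := by
        simp [bTokens', PySem.List.enumerate_cons]
      rw [List.foldl_cons, hstep, ih (c + 1) _ hd', hsplit, List.foldl_append]

-- value at w of the upsert fold
theorem upsert_getD (toks : List (Int × String)) (d : PySem.Dict String (List Int)) (w : String) :
    (toks.foldl upsert d).getD w PySem.Set.empty
      = ((toks.filter (fun p => p.2 == w)).map Prod.fst).foldl PySem.Set.add
          (d.getD w PySem.Set.empty) := by
  induction toks generalizing d with
  | nil => rfl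
  | cons p ps ih =>
      simp only [List.foldl_cons, List.filter_cons]
      by_cases hp : p.2 = w
      · rw [ih, upsert, PySem.Dict.getD_modify]
        simp [hp]
      · rw [ih, upsert, PySem.Dict.getD_modify]
        simp [hp, Ne.symm hp]

-- the upsert fold, read out as items, is B's group-by
theorem upsert_items (toks : List (Int × String)) :
    (toks.foldl upsert PySem.Dict.empty).items
      = (PySem.List.dedup (toks.map Prod.snd)).map
          (fun w => (w, PySem.Set.ofList ((toks.filter (fun p => p.2 == w)).map Prod.fst))) := by
  have hnd : (toks.foldl upsert PySem.Dict.empty).keys.Nodup :=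
    PySem.Dict.nodup_keys_foldl_modify_key toks Prod.snd PySem.Set.empty
      (fun _ x s => PySem.Set.add s x.1) PySem.Dict.empty (by simp)
  have hkeys : (toks.foldl upsert PySem.Dict.empty).keys
      = PySem.Set.ofList (toks.map Prod.snd) := by
    have h := PySem.Dict.keys_foldl_modify_key toks Prod.snd PySem.Set.empty
      (fun _ x s => PySem.Set.add s x.1) PySem.Dict.empty
    simpa [PySem.Set.update, PySem.Set.ofList_eq_foldl] using h
  rw [PySem.Dict.items_eq_map_keys _ hnd PySem.Set.empty, hkeys, PySem.List.dedup_eq_ofList]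
  refine List.map_congr_left (fun w _ => ?_)
  rw [upsert_getD]
  simp [PySem.Set.ofList_eq_foldl]

-- ===== VERDICT (by name: the statement is the Claim_ definition above) =====
theorem print_index_spec : Claim_equal_print_index := by
  intro f_obj main_words _
  unfold Spec_print_index print_index print_index_alt
  rw [set1_eq]
  rw [lines_eq (bTargets main_words) f_obj 1 PySem.Dict.empty (by simp)]
  have : bTokens' f_obj 1 (bTargets main_words) = bTokens f_obj (bTargets main_words) := rfl
  rw [this, upsert_items]
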